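-- pv_equiv track=rewrite | github.com/dannyvoid/Set-RandomMullvadLocation | RandomMullvadLocation.py | get_location_shorthand
-- ===== SOURCE A (Python) =====
-- def get_location_shorthand(locations, input_country):
--     for location in locations:
--         if input_country.lower() == location["Shorthand"]:
--             return location["Shorthand"]
--
--     for location in locations:
--         if input_country.lower() == location["Country"].lower():
--             return location["Shorthand"]
--
--     return None
-- ===== SOURCE B (Python) =====
-- def get_location_shorthand(locations, input_country):
--     low = input_country.lower()
--     fallback = None
--     for location in locations:
--         if low == location["Shorthand"]:
--             return location["Shorthand"]
--         if fallback is None and low == location["Country"].lower():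
--             fallback = location["Shorthand"]
--     return fallback
-- ===== Notes on version B (the rewrite author's own statement) =====
-- stated objective: faster
-- what changed: Collapses A's two full scans into a single pass that returns on a Shorthand match and records the first Country match in a fallback variable returned after the loop.
-- outside the precondition, e.g. on get_location_shorthand([{'Shorthand': 'x'}, {'Shorthand': 'se'}], 'se'): A returns 'se', B raises KeyError
import Mathlib
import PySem

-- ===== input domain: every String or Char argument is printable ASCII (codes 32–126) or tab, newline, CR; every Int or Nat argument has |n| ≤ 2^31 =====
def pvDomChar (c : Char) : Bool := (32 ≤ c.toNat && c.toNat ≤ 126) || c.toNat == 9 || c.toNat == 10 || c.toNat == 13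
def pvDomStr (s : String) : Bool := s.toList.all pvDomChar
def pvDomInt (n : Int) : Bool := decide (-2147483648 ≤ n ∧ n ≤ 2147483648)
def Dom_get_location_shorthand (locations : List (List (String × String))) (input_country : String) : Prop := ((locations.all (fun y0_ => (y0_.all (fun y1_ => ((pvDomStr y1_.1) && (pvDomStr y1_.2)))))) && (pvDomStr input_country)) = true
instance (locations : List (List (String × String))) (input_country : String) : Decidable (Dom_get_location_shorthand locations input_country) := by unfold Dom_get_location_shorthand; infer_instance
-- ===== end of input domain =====

-- B collapses A's two scans into one pass with a fallback variable (returns the same value; constant-factor change).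

-- ===== PORT A =====
-- first loop of A: `some r` = A returned r from this loop; `none` = fell through.
-- A KeyError on a missing "Shorthand" key (excluded by Pre_) is rendered as `some none`.
def pvA_loop1 (low : String) : List (List (String × String)) → Option (Option String)
  | [] => none
  | l :: rest =>
    match (PySem.Dict.mk l).get? "Shorthand" with
    | none => some none
    | some s => if low == s then some (some s) else pvA_loop1 low rest

-- second loop of A; a KeyError on a missing "Country"/"Shorthand" key (excluded by Pre_) yields `none`.
def pvA_loop2 (low : String) : List (List (String × String)) → Option String
  | [] => none
  | l :: rest =>
    match (PySem.Dict.mk l).get? "Country" with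
    | none => none
    | some c => if low == PySem.Str.lower c then (PySem.Dict.mk l).get? "Shorthand" else pvA_loop2 low rest

def get_location_shorthand (locations : List (List (String × String))) (input_country : String) : Option String :=
  match pvA_loop1 (PySem.Str.lower input_country) locations with
  | some r => r
  | none => pvA_loop2 (PySem.Str.lower input_country) locations

-- ===== PORT B =====
-- single pass with a fallback accumulator; a KeyError (excluded by Pre_) yields `none`.
def pvB_go (low : String) : List (List (String × String)) → Option String → Option String
  | [], fb => fb
  | l :: rest, fb =>
    match (PySem.Dict.mk l).get? "Shorthand" with
    | none => none
    | some s =>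
      if low == s then some s
      else if fb.isNone then
        match (PySem.Dict.mk l).get? "Country" with
        | none => none
        | some c => pvB_go low rest (if low == PySem.Str.lower c then some s else fb)
      else pvB_go low rest fb

def get_location_shorthand_alt (locations : List (List (String × String))) (input_country : String) : Option String :=
  pvB_go (PySem.Str.lower input_country) locations none

-- ===== PRECONDITION & SPEC =====
-- Pre_ excludes locations missing a "Shorthand" or "Country" key, on which A may raise KeyError
-- (and returns, if at all, only by the accident of which loop reaches the malformed entry first).
-- key-presence test written over Char lists so the kernel can decide Pre_ fast on literals
def pvHasKey (l : List (String × String)) (k : String) : Bool := l.any (fun p => p.1.toList == k.toList)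

def Pre_get_location_shorthand (locations : List (List (String × String))) (input_country : String) : Prop :=
  ∀ l ∈ locations, pvHasKey l "Shorthand" = true ∧ pvHasKey l "Country" = true
instance (locations : List (List (String × String))) (input_country : String) : Decidable (Pre_get_location_shorthand locations input_country) := by unfold Pre_get_location_shorthand; infer_instance

def pvWitness_get_location_shorthand : (List (List (String × String))) × String :=
  ([[("Shorthand", "se"), ("Country", "Sweden")], [("Shorthand", "de"), ("Country", "Germany")]], "Germany")

def Spec_get_location_shorthand (locations : List (List (String × String))) (input_country : String) (out : Option String) : Prop := out = get_location_shorthand_alt locations input_country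
instance (locations : List (List (String × String))) (input_country : String) (out : Option String) : Decidable (Spec_get_location_shorthand locations input_country out) := by unfold Spec_get_location_shorthand; infer_instance

-- ===== CLAIM (what is proved, stated in full; the proofs are below) =====
def Claim_equal_get_location_shorthand : Prop := ∀ (locations : List (List (String × String))) (input_country : String), Dom_get_location_shorthand locations input_country → Pre_get_location_shorthand locations input_country → Spec_get_location_shorthand locations input_country (get_location_shorthand locations input_country)

-- ===== LEMMAS AND PROOFS =====

theorem pvHasKey_get? (l : List (String × String)) (k : String) :
    pvHasKey l k = ((PySem.Dict.mk l).get? k).isSome := by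
  induction l with
  | nil => simp [pvHasKey, PySem.Dict.get?]
  | cons p rest ih =>
    rw [show PySem.Dict.mk (p :: rest) = PySem.Dict.mk ((p.1, p.2) :: rest) by rfl]
    rw [PySem.Dict.get?_mk_cons]
    by_cases h : p.1 = k
    · simp [pvHasKey, h]
    · simp only [pvHasKey, List.any_cons, beq_iff_eq] at *
      simp [h, ih, String.toList_inj]

theorem pvB_go_eq (low : String) (locs : List (List (String × String))) (fb : Option String)
    (h : ∀ l ∈ locs, ((PySem.Dict.mk l).get? "Shorthand").isSome ∧ ((PySem.Dict.mk l).get? "Country").isSome) :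
    pvB_go low locs fb =
      match pvA_loop1 low locs with
      | some r => r
      | none => if fb.isSome then fb else pvA_loop2 low locs := by
  induction locs generalizing fb with
  | nil => cases fb <;> simp [pvB_go, pvA_loop1, pvA_loop2]
  | cons l rest ih =>
    obtain ⟨s, hs⟩ := Option.isSome_iff_exists.mp (h l (by simp)).1
    obtain ⟨c, hc⟩ := Option.isSome_iff_exists.mp (h l (by simp)).2
    have hrest : ∀ l ∈ rest, ((PySem.Dict.mk l).get? "Shorthand").isSome ∧ ((PySem.Dict.mk l).get? "Country").isSome :=
      fun l hl => h l (by simp [hl])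
    by_cases hls : low == s
    · simp [pvB_go, pvA_loop1, hs, hls]
    · cases fb with
      | some v =>
        rw [show pvB_go low (l :: rest) (some v) = pvB_go low rest (some v) by
              simp [pvB_go, hs, hls],
            ih _ hrest]
        simp [pvA_loop1, hs, hls]
      | none =>
        rw [show pvB_go low (l :: rest) none
              = pvB_go low rest (if low == PySem.Str.lower c then some s else none) by
              simp [pvB_go, hs, hls, hc],
            ih _ hrest]
        by_cases hlc : low == PySem.Str.lower c <;>
          simp [pvA_loop1, pvA_loop2, hs, hls, hc, hlc]

-- ===== VERDICT (by name: the statement is the Claim_ definition above) =====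
theorem get_location_shorthand_spec : Claim_equal_get_location_shorthand := by
  intro locations input_country _hdom hpre
  unfold Spec_get_location_shorthand get_location_shorthand get_location_shorthand_alt
  rw [pvB_go_eq _ _ _ (fun l hl => by
    have h := hpre l hl
    rw [pvHasKey_get?, pvHasKey_get?] at h
    exact h)]
  cases hA : pvA_loop1 (PySem.Str.lower input_country) locations <;> simp
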